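-- pv_equiv track=rewrite | github.com/panizolledotangel/FGCS-2020-DCD-Dynamic-MOGA | jupyter_home/sources/gas/auxiliary_funtions.py | order_by_community
-- ===== SOURCE A (Python) =====
-- from typing import List, Dict, Tuple
--
-- def order_by_community(members: List[int], nodes_index: List[int]) -> Dict[int, List[int]]:
--     aux_comminities = {}
--
--     for index in nodes_index:
--         comm_id = members[index]
--         if comm_id not in aux_comminities:
--             aux_comminities[comm_id] = []
--         aux_comminities[comm_id].append(index)
--
--     return aux_comminities
-- ===== SOURCE B (Python) =====
-- def order_by_community(members, nodes_index):
--     if not nodes_index: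
--         return {}
--     c = members[nodes_index[0]]
--     res = {c: [i for i in nodes_index if members[i] == c]}
--     rest = [i for i in nodes_index if members[i] != c]
--     for k, v in order_by_community(members, rest).items():
--         res[k] = v
--     return res
-- ===== Notes on version B (the rewrite author's own statement) =====
-- stated objective: alternative
-- what changed: A builds the dict in one left-to-right fold, appending each index to its community's list; B instead recursively partitions nodes_index: it takes the first index's community, collects that whole group with one filter, and recurses on the remaining indices.
import Mathlib
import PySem

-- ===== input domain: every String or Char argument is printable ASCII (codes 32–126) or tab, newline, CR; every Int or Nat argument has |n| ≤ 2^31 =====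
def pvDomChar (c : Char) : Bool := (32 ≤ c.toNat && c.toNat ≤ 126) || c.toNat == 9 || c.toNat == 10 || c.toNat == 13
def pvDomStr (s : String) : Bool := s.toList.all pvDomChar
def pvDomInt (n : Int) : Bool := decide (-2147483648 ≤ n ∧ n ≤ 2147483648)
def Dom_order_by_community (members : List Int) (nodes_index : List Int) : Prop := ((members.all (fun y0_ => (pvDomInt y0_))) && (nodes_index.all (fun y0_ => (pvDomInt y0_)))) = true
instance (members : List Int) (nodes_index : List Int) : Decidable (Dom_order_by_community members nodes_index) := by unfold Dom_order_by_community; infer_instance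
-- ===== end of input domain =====

-- B replaces A's incremental dict-of-lists fold by a recursive partition: take the first
-- community, grab all its indices with one filter, recurse on the remainder (objective: alternative).

-- ===== PORT A =====
-- literal port of A's loop: a dict accumulator, 'if comm_id not in d: d[comm_id] = []' then append
def order_by_community (members : List Int) (nodes_index : List Int) : List (Int × List Int) :=
  (nodes_index.foldl
    (fun d index =>
      let comm_id := PySem.List.pyGetD members index 0
      let d := if d.contains comm_id then d else d.insert comm_id []
      d.modify comm_id [] (fun l => l ++ [index]))
    PySem.Dict.empty).items

-- ===== PORT B =====
-- port of Source B: peel the first index's community, filter its whole group, recurse on the rest,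
-- then copy the recursive dict's items into the one-key dict (the 'for k, v in …: res[k] = v' loop)
def order_by_community_altDict (members : List Int) (nodes_index : List Int) :
    PySem.Dict Int (List Int) :=
  match nodes_index with
  | [] => PySem.Dict.empty
  | i :: t =>
    let c := PySem.List.pyGetD members i 0
    let res := PySem.Dict.empty.insert c
      ((i :: t).filter (fun j => PySem.List.pyGetD members j 0 == c))
    let rest := (i :: t).filter (fun j => !(PySem.List.pyGetD members j 0 == c))
    (order_by_community_altDict members rest).items.foldl
      (fun d p => d.insert p.1 p.2) res
  termination_by nodes_index.length
  decreasing_by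
    simp only [List.filter_cons, beq_self_eq_true, Bool.not_true, if_neg, Bool.false_eq_true,
      not_false_eq_true, List.length_cons]
    exact Nat.lt_succ_of_le (List.length_filter_le _ _)

def order_by_community_alt (members : List Int) (nodes_index : List Int) : List (Int × List Int) :=
  (order_by_community_altDict members nodes_index).items

-- ===== PRECONDITION & SPEC =====
-- Pre_ excludes exactly the inputs where A raises IndexError: some index in nodes_index out of
-- Python range for members
def Pre_order_by_community (members : List Int) (nodes_index : List Int) : Prop :=
  ∀ i ∈ nodes_index, PySem.Raise.InRange members.length i
instance (members : List Int) (nodes_index : List Int) : Decidable (Pre_order_by_community members nodes_index) := by unfold Pre_order_by_community; infer_instance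

def pvWitness_order_by_community : List Int × List Int := ([5, 7, 5], [0, 1, 2, 0])

def Spec_order_by_community (members : List Int) (nodes_index : List Int) (out : List (Int × List Int)) : Prop := out = order_by_community_alt members nodes_index
instance (members : List Int) (nodes_index : List Int) (out : List (Int × List Int)) : Decidable (Spec_order_by_community members nodes_index out) := by unfold Spec_order_by_community; infer_instance

-- ===== CLAIM (what is proved, stated in full; the proofs are below) =====
def Claim_equal_order_by_community : Prop := ∀ (members : List Int) (nodes_index : List Int), Dom_order_by_community members nodes_index → Pre_order_by_community members nodes_index → Spec_order_by_community members nodes_index (order_by_community members nodes_index)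

-- ===== LEMMAS AND PROOFS =====

-- the common canonical form: first-seen distinct community ids, each paired with its filter
def obcCanon (members : List Int) (l : List Int) : List (Int × List Int) :=
  (PySem.Set.ofList (l.map (fun j => PySem.List.pyGetD members j 0))).map
    (fun k => (k, l.filter (fun j => PySem.List.pyGetD members j 0 == k)))

-- A's per-element step is exactly 'modify'
lemma obc_stepA_eq_modify (members : List Int) (d : PySem.Dict Int (List Int)) (x : Int) :
    (let c := PySem.List.pyGetD members x 0
     let d' := if d.contains c then d else d.insert c []
     d'.modify c [] (fun l => l ++ [x])) =
    d.modify (PySem.List.pyGetD members x 0) [] (fun l => l ++ [x]) := by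
  set c := PySem.List.pyGetD members x 0
  by_cases h : d.contains c
  · simp [h]
  · simp only [h, Bool.false_eq_true, if_neg, not_false_eq_true, PySem.Dict.modify]
    rw [PySem.Dict.getD_insert_self, PySem.Dict.insert_insert_self,
      PySem.Dict.getD_of_not_contains _ _ (by simpa using h)]

lemma obc_A_eq_modify_fold (members : List Int) (l : List Int) :
    order_by_community members l =
    (l.foldl (fun d x => d.modify (PySem.List.pyGetD members x 0) [] (fun l => l ++ [x]))
      PySem.Dict.empty).items := by
  unfold order_by_community
  congr 1
  exact (PySem.List.foldl_congr_mem l _ _ _ (fun d x _ => obc_stepA_eq_modify members d x))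

-- filter commutes with Set.add
lemma obc_add_filter {s : PySem.Set Int} {x : Int} (p : Int → Bool) :
    (PySem.Set.add s x).filter p =
      if p x then PySem.Set.add (s.filter p) x else s.filter p := by
  by_cases hm : x ∈ s <;> by_cases hp : p x <;>
    simp [PySem.Set.add, PySem.Set.contains_eq_listContains, List.filter_append,
      List.mem_filter, hm, hp]

lemma obc_update_filter (p : Int → Bool) (l : List Int) :
    ∀ s : PySem.Set Int,
      PySem.Set.update (s.filter p) (l.filter p) = (PySem.Set.update s l).filter p := by
  induction l with
  | nil => intro s; simp [PySem.Set.update]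
  | cons x t ih =>
    intro s
    rw [List.filter_cons]
    by_cases hp : p x
    · simp only [hp, if_pos]
      rw [PySem.Set.update_cons, PySem.Set.update_cons, ← ih (PySem.Set.add s x),
        obc_add_filter p, if_pos hp]
    · simp only [hp, Bool.false_eq_true, if_neg, not_false_eq_true]
      rw [PySem.Set.update_cons, ← ih (PySem.Set.add s x), obc_add_filter p,
        if_neg (by simp [hp])]

lemma obc_ofList_filter (p : Int → Bool) (l : List Int) :
    PySem.Set.ofList (l.filter p) = (PySem.Set.ofList l).filter p := by
  have h := obc_update_filter p l []
  simpa [PySem.Set.update_nil_left] using h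

lemma obc_ofList_cons (x : Int) (l : List Int) :
    PySem.Set.ofList (x :: l) =
      x :: (PySem.Set.ofList l).filter (fun y => !(y == x)) := by
  rw [show x :: l = [x] ++ l from rfl, PySem.Set.ofList_append,
    PySem.Set.update_eq_append_filter]
  have : PySem.Set.ofList [x] = [x] := rfl
  rw [this, List.singleton_append]
  congr 1
  apply List.filter_congr
  intro a _
  by_cases h : a = x <;> simp [PySem.Set.contains_eq_listContains, h]

-- A computes the canonical form
lemma obc_A_eq_canon (members : List Int) (l : List Int) :
    order_by_community members l = obcCanon members l := by
  rw [obc_A_eq_modify_fold]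
  set key : Int → Int := fun j => PySem.List.pyGetD members j 0 with hkey
  set D := l.foldl (fun d x => d.modify (key x) [] (fun l => l ++ [x])) PySem.Dict.empty with hD
  have hnd : D.keys.Nodup := by
    rw [hD]
    exact PySem.Dict.nodup_keys_foldl_modify_key l key [] _ _ PySem.Dict.nodup_keys_empty
  have hkeys : D.keys = PySem.Set.ofList (l.map key) := by
    rw [hD, PySem.Dict.keys_foldl_modify_key]
    simp [PySem.Dict.keys_empty, PySem.Set.update_nil_left]
  have hget : ∀ c : Int, D.getD c [] = l.filter (fun j => key j == c) := by
    intro c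
    have := PySem.Dict.getD_foldl_modify_append (l.map (fun x => (key x, x)))
      PySem.Dict.empty c
    rw [List.foldl_map] at this
    rw [hD, this]
    simp [PySem.Dict.getD_empty, List.filter_map, Function.comp_def]
  rw [PySem.Dict.items_eq_map_keys D hnd [], hkeys]
  unfold obcCanon
  apply List.map_congr_left
  intro k _
  rw [hget k]

lemma obc_mem_ofList_map_rest (members : List Int) (c : Int) (rest : List Int)
    (hrest : ∀ j ∈ rest, ¬(PySem.List.pyGetD members j 0 = c)) :
    ∀ k ∈ PySem.Set.ofList (rest.map (fun j => PySem.List.pyGetD members j 0)), k ≠ c := by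
  intro k hk
  have : k ∈ rest.map (fun j => PySem.List.pyGetD members j 0) := by
    have := PySem.List.mem_dedup (xs := rest.map (fun j => PySem.List.pyGetD members j 0)) (x := k)
    simp only [PySem.List.dedup_eq_ofList] at this
    exact this.mp hk
  obtain ⟨j, hj, rfl⟩ := List.mem_map.mp this
  exact hrest j hj

-- B computes the canonical form
lemma obc_B_eq_canon (members : List Int) : ∀ (l : List Int),
    (order_by_community_altDict members l).items = obcCanon members l := by
  intro l
  induction hn : l.length using Nat.strong_induction_on generalizing l with
  | _ n ih =>
  match l with
  | [] => simp [order_by_community_altDict, obcCanon, PySem.Set.ofList]; rfl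
  | i :: t =>
    rw [order_by_community_altDict]
    set key : Int → Int := fun j => PySem.List.pyGetD members j 0 with hkey
    set c := key i with hc
    set same := (i :: t).filter (fun j => key j == c) with hsame
    set rest := (i :: t).filter (fun j => !(key j == c)) with hrestdef
    have hrest_t : rest = t.filter (fun j => !(key j == c)) := by
      rw [hrestdef, List.filter_cons]
      simp [hc]
    have hrest_len : rest.length < n := by
      rw [hrest_t]
      have := List.length_filter_le (fun j => !(key j == c)) t
      simp only [← hn, List.length_cons]; omega
    have hrest_ne : ∀ j ∈ rest, ¬(key j = c) := by
      intro j hj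
      rw [hrestdef] at hj
      have := (List.mem_filter.mp hj).2
      simpa using this
    have hIH : (order_by_community_altDict members rest).items = obcCanon members rest :=
      ih rest.length hrest_len rest rfl
    -- the copy loop appends fresh keys
    have hfresh : ∀ p ∈ (order_by_community_altDict members rest).items,
        (PySem.Dict.empty.insert c same).contains p.1 = false := by
      intro p hp
      rw [hIH] at hp
      unfold obcCanon at hp
      obtain ⟨k, hk, rfl⟩ := List.mem_map.mp hp
      have hkc : k ≠ c := obc_mem_ofList_map_rest members c rest (by exact_mod_cast hrest_ne) k hk
      rw [PySem.Dict.contains_insert]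
      simp [hkc, PySem.Dict.contains_empty]
    have hndk : ((order_by_community_altDict members rest).items.map (·.1)).Nodup := by
      rw [hIH]
      unfold obcCanon
      rw [List.map_map]
      have heq : ((PySem.Set.ofList (rest.map key)).map
          ((fun p : Int × List Int => p.1) ∘ fun k => (k, rest.filter (fun j => key j == k)))) =
          (PySem.Set.ofList (rest.map key)).map id := rfl
      rw [heq, List.map_id]
      have := PySem.List.nodup_dedup (xs := rest.map key)
      simp only [PySem.List.dedup_eq_ofList] at this; exact this
    have hfold := PySem.Dict.items_foldl_insert_fresh
      ((order_by_community_altDict members rest).items) (fun p => p.1) (fun p => p.2)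
      (PySem.Dict.empty.insert c same) hfresh hndk
    simp only [Prod.mk.eta, List.map_id_fun', id] at hfold
    rw [hfold, PySem.Dict.items_insert_of_not_contains _ _ (by simp [PySem.Dict.contains_empty]),
      hIH]
    have hres : PySem.Dict.empty.items = ([] : List (Int × List Int)) := rfl
    rw [hres, List.nil_append, List.singleton_append]
    -- now show (c, same) :: obcCanon rest = obcCanon (i :: t)
    unfold obcCanon
    have hmapcons : (i :: t).map (fun j => PySem.List.pyGetD members j 0) = key i :: t.map key := rfl
    rw [hmapcons, ← hc, obc_ofList_cons]
    have hrest_map : rest.map key = (t.map key).filter (fun y => !(y == c)) := by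
      rw [hrest_t, List.filter_map]
      rfl
    rw [List.map_cons]
    congr 1
    rw [hrest_map, obc_ofList_filter]
    apply List.map_congr_left
    intro k hk
    have hkc : k ≠ c := by
      have := (List.mem_filter.mp hk).2
      simpa using this
    have hfilt : rest.filter (fun j => key j == k) = (i :: t).filter (fun j => key j == k) := by
      rw [hrestdef, List.filter_filter]
      apply List.filter_congr
      intro a _
      by_cases hak : key a = k
      · simp [hak, hkc]
      · simp [hak]
    rw [hfilt]

-- ===== VERDICT (by name: the statement is the Claim_ definition above) =====
theorem order_by_community_spec : Claim_equal_order_by_community := by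
  intro members nodes_index _ _
  unfold Spec_order_by_community order_by_community_alt
  rw [obc_A_eq_canon, obc_B_eq_canon]
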